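-- pv_equiv track=rewrite | github.com/Sunil-Hegde/AdventOfCode | 2015/day16/day16.py | comparePartTwo
-- ===== SOURCE A (Python) =====
-- def comparePartTwo(processedData):
--     referenceDict = {
--         'children': 3,
--         'cats': 7,
--         'samoyeds': 2,
--         'pomeranians': 3,
--         'akitas': 0,
--         'vizslas': 0,
--         'goldfish': 5,
--         'trees': 3,
--         'cars': 2,
--         'perfumes': 1
--     }
--     compList = []
--     for aunt in processedData:
--         count = 0
--         for key, value in aunt.items():
--             if key in ['cats', 'trees']:
--                 if value >= referenceDict[key]:
--                     count += 1
--             elif key in ['pomeranians', 'goldfish']: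
--                 if value <= referenceDict[key]:
--                     count += 1
--             elif value == referenceDict[key]:
--                 count += 1
--         compList.append(count)
--     return compList
-- ===== SOURCE B (Python) =====
-- # Interval-table formulation: each reference property allows a closed/half-open
-- # range of values; iterate the fixed reference list and probe the aunt's dict,
-- # instead of iterating the aunt's items and branching per key.
-- REFERENCE_RANGES = [
--     ('children', 3, 3),
--     ('cats', 7, None),
--     ('samoyeds', 2, 2),
--     ('pomeranians', None, 3),
--     ('akitas', 0, 0),
--     ('vizslas', 0, 0),
--     ('goldfish', None, 5),
--     ('trees', 3, None),
--     ('cars', 2, 2),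
--     ('perfumes', 1, 1),
-- ]
--
-- def comparePartTwo(processedData):
--     out = []
--     for aunt in processedData:
--         n = 0
--         for prop, lo, hi in REFERENCE_RANGES:
--             if prop in aunt:
--                 v = aunt[prop]
--                 if (lo is None or lo <= v) and (hi is None or v <= hi):
--                     n += 1
--         out.append(n)
--     return out
-- ===== Notes on version B (the rewrite author's own statement) =====
-- stated objective: alternative
-- what changed: B inverts the traversal: it encodes the reference as a fixed list of (property, lo, hi) intervals and, per aunt, iterates those ten intervals probing the aunt's dict, instead of A's iteration over the aunt's items with a per-key if/elif comparison chain against the reference dict.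
import Mathlib
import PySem

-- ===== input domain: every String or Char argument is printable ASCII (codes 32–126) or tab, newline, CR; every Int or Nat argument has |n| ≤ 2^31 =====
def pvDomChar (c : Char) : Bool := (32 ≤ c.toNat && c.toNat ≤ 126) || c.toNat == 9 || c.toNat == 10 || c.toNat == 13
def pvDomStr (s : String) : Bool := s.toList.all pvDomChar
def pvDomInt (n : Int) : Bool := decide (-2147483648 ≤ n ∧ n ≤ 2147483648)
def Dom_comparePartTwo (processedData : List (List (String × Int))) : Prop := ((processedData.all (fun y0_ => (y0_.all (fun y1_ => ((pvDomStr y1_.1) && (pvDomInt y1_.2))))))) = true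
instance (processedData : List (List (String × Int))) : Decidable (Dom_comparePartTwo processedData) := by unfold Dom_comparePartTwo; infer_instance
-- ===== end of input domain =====

-- B inverts the traversal: a fixed list of (property, lo, hi) reference intervals is scanned
-- per aunt, probing the aunt's dict, instead of A's per-item if/elif chain (alternative; same cost).


-- ===== PORT A =====
def pvRefDict : PySem.Dict String Int :=
  PySem.Dict.ofList [("children", 3), ("cats", 7), ("samoyeds", 2), ("pomeranians", 3),
    ("akitas", 0), ("vizslas", 0), ("goldfish", 5), ("trees", 3), ("cars", 2), ("perfumes", 1)]

-- referenceDict[key] raises KeyError on keys not in the reference; Pre_ excludes those inputs,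
-- so the default in getD is never reached on the claimed domain.
def comparePartTwo (processedData : List (List (String × Int))) : List Int :=
  processedData.foldl (fun compList aunt =>
    let count := (PySem.Dict.ofList aunt).items.foldl (fun count kv =>
      let key := kv.1
      let value := kv.2
      if key = "cats" ∨ key = "trees" then
        if value ≥ pvRefDict.getD key 0 then count + 1 else count
      else if key = "pomeranians" ∨ key = "goldfish" then
        if value ≤ pvRefDict.getD key 0 then count + 1 else count
      else if value = pvRefDict.getD key 0 then count + 1 else count) (0 : Int)
    compList ++ [count]) []

-- ===== PORT B =====
-- the REFERENCE_RANGES table of Source B: (property, lower bound or None, upper bound or None)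
def pvRanges : List (String × Option Int × Option Int) :=
  [("children", some 3, some 3), ("cats", some 7, none), ("samoyeds", some 2, some 2),
   ("pomeranians", none, some 3), ("akitas", some 0, some 0), ("vizslas", some 0, some 0),
   ("goldfish", none, some 5), ("trees", some 3, none), ("cars", some 2, some 2),
   ("perfumes", some 1, some 1)]

-- (lo is None or lo <= v) and (hi is None or v <= hi)
def pvInRangeB (lo hi : Option Int) (v : Int) : Bool :=
  (match lo with | none => true | some l => decide (l ≤ v)) &&
  (match hi with | none => true | some h => decide (v ≤ h))

-- 'prop in aunt' followed by 'aunt[prop]' is the one dict lookup get?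
def comparePartTwo_alt (processedData : List (List (String × Int))) : List Int :=
  processedData.foldl (fun out aunt =>
    let d := PySem.Dict.ofList aunt
    let n := pvRanges.foldl (fun n r =>
      match d.get? r.1 with
      | some v => if pvInRangeB r.2.1 r.2.2 v then n + 1 else n
      | none => n) (0 : Int)
    out ++ [n]) []

-- ===== PRECONDITION & SPEC =====
def pvAllowedKeys : List String :=
  ["children", "cats", "samoyeds", "pomeranians", "akitas", "vizslas", "goldfish", "trees",
   "cars", "perfumes"]

-- Pre_ holds exactly when every property name occurs in the reference table; on any other
-- input A raises KeyError.
def Pre_comparePartTwo (processedData : List (List (String × Int))) : Prop :=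
  ∀ aunt ∈ processedData, ∀ kv ∈ aunt, kv.1 ∈ pvAllowedKeys

instance (processedData : List (List (String × Int))) : Decidable (Pre_comparePartTwo processedData) := by unfold Pre_comparePartTwo; infer_instance

def pvWitness_comparePartTwo : (List (List (String × Int))) :=
  [[("cats", 8), ("children", 3), ("goldfish", 9)], [("trees", 0)], []]

def Spec_comparePartTwo (processedData : List (List (String × Int))) (out : List Int) : Prop := out = comparePartTwo_alt processedData
instance (processedData : List (List (String × Int))) (out : List Int) : Decidable (Spec_comparePartTwo processedData out) := by unfold Spec_comparePartTwo; infer_instance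

-- ===== CLAIM (what is proved, stated in full; the proofs are below) =====
def Claim_equal_comparePartTwo : Prop := ∀ (processedData : List (List (String × Int))), Dom_comparePartTwo processedData → Pre_comparePartTwo processedData → Spec_comparePartTwo processedData (comparePartTwo processedData)

-- ===== LEMMAS AND PROOFS =====

lemma pvKeys_ofList (l : List (String × Int)) :
    (PySem.Dict.ofList l).keys = PySem.Set.ofList (l.map Prod.fst) := by
  show (l.foldl (fun d p => d.insert p.1 p.2) PySem.Dict.empty).keys = _
  rw [PySem.Dict.keys_foldl_insert_key l Prod.fst (fun _ p => p.2)]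
  simp [PySem.Dict.keys_empty, PySem.Set.update_nil_left]

-- per-property indicator actually counted by A's branch chain
def pvAInd (kv : String × Int) : Int :=
  if kv.1 = "cats" ∨ kv.1 = "trees" then
    if kv.2 ≥ pvRefDict.getD kv.1 0 then 1 else 0
  else if kv.1 = "pomeranians" ∨ kv.1 = "goldfish" then
    if kv.2 ≤ pvRefDict.getD kv.1 0 then 1 else 0
  else if kv.2 = pvRefDict.getD kv.1 0 then 1 else 0

-- per-range indicator counted by B's interval scan
def pvBInd (rv : (String × Option Int × Option Int) × Int) : Int :=
  if pvInRangeB rv.1.2.1 rv.1.2.2 rv.2 then 1 else 0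

-- the (range, value) pairs B's scan actually finds in the dict d
def pvM (d : PySem.Dict String Int) : List ((String × Option Int × Option Int) × Int) :=
  pvRanges.filterMap (fun r => (d.get? r.1).map (fun v => (r, v)))

lemma pvFoldA_eq (l : List (String × Int)) (c : Int) :
    l.foldl (fun count kv =>
      let key := kv.1
      let value := kv.2
      if key = "cats" ∨ key = "trees" then
        if value ≥ pvRefDict.getD key 0 then count + 1 else count
      else if key = "pomeranians" ∨ key = "goldfish" then
        if value ≤ pvRefDict.getD key 0 then count + 1 else count
      else if value = pvRefDict.getD key 0 then count + 1 else count) c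
    = c + (l.map pvAInd).sum := by
  induction l generalizing c with
  | nil => simp
  | cons kv t ih =>
    simp only [List.foldl_cons, List.map_cons, List.sum_cons, ih]
    simp only [pvAInd]
    split_ifs <;> ring

lemma pvFoldB_eq (d : PySem.Dict String Int) (R : List (String × Option Int × Option Int))
    (c : Int) :
    R.foldl (fun n r =>
      match d.get? r.1 with
      | some v => if pvInRangeB r.2.1 r.2.2 v then n + 1 else n
      | none => n) c
    = c + ((R.filterMap (fun r => (d.get? r.1).map (fun v => (r, v)))).map pvBInd).sum := by
  induction R generalizing c with
  | nil => simp
  | cons r t ih =>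
    simp only [List.foldl_cons, List.filterMap_cons]
    cases h : d.get? r.1 with
    | none => simp [ih]
    | some v =>
      simp only [Option.map_some, List.map_cons, List.sum_cons, ih]
      simp only [pvBInd]
      split_ifs <;> ring

lemma pvM_keys (d : PySem.Dict String Int) (R : List (String × Option Int × Option Int)) :
    (R.filterMap (fun r => (d.get? r.1).map (fun v => (r, v)))).map (fun rv => rv.1.1)
    = (R.filter (fun r => (d.get? r.1).isSome)).map (fun r => r.1) := by
  induction R with
  | nil => rfl
  | cons r t ih =>
    simp only [List.filterMap_cons, List.filter_cons]
    cases d.get? r.1 <;> simp [ih]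

lemma pvM_nodup (d : PySem.Dict String Int) :
    ((pvM d).map (fun rv => (rv.1.1, rv.2))).Nodup := by
  have hk : ((pvM d).map (fun rv => rv.1.1)).Nodup := by
    rw [pvM, pvM_keys]
    refine List.Nodup.sublist (List.Sublist.map _ List.filter_sublist) ?_
    decide
  have : (((pvM d).map (fun rv => (rv.1.1, rv.2))).map Prod.fst).Nodup := by
    simpa [List.map_map, Function.comp] using hk
  exact this.of_map _

lemma pvItems_nodup (d : PySem.Dict String Int) (hnd : d.keys.Nodup) : d.items.Nodup := by
  have : (d.items.map Prod.fst).Nodup := by simpa [PySem.Dict.keys] using hnd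
  exact this.of_map _

lemma pvM_mem (d : PySem.Dict String Int) (hnd : d.keys.Nodup)
    (hsub : ∀ kv ∈ d.items, kv.1 ∈ pvAllowedKeys) (a : String × Int) :
    a ∈ (pvM d).map (fun rv => (rv.1.1, rv.2)) ↔ a ∈ d.items := by
  simp only [pvM, List.mem_map, List.mem_filterMap, Option.map_eq_some_iff]
  constructor
  · rintro ⟨rv, ⟨r, hr, v, hget, rfl⟩, rfl⟩
    exact PySem.Dict.mem_items_of_get?_eq_some _ hget
  · intro ha
    have hget : d.get? a.1 = some a.2 := PySem.Dict.get?_of_mem_items _ ha hnd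
    have hk : a.1 ∈ pvAllowedKeys := hsub a ha
    have hex : ∀ k ∈ pvAllowedKeys, ∃ r ∈ pvRanges, r.1 = k := by decide
    obtain ⟨r, hr, hrk⟩ := hex a.1 hk
    exact ⟨(r, a.2), ⟨r, hr, a.2, by rw [hrk]; exact hget, rfl⟩, by rw [hrk]⟩

lemma pvM_perm (d : PySem.Dict String Int) (hnd : d.keys.Nodup)
    (hsub : ∀ kv ∈ d.items, kv.1 ∈ pvAllowedKeys) :
    ((pvM d).map (fun rv => (rv.1.1, rv.2))).Perm d.items := by
  exact (List.perm_ext_iff_of_nodup (pvM_nodup d) (pvItems_nodup d hnd)).mpr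
    (pvM_mem d hnd hsub)

-- A's branch-chain indicator agrees with B's interval test on every reference range
lemma pvInd_agree : ∀ r ∈ pvRanges, ∀ v : Int, pvAInd (r.1, v) = pvBInd (r, v) := by
  intro r hr
  fin_cases hr <;> intro v <;>
    simp [pvAInd, pvBInd, pvInRangeB, show pvRefDict.getD "children" 0 = 3 from by decide,
      show pvRefDict.getD "cats" 0 = 7 from by decide,
      show pvRefDict.getD "samoyeds" 0 = 2 from by decide,
      show pvRefDict.getD "pomeranians" 0 = 3 from by decide,
      show pvRefDict.getD "akitas" 0 = 0 from by decide,
      show pvRefDict.getD "vizslas" 0 = 0 from by decide,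
      show pvRefDict.getD "goldfish" 0 = 5 from by decide,
      show pvRefDict.getD "trees" 0 = 3 from by decide,
      show pvRefDict.getD "cars" 0 = 2 from by decide,
      show pvRefDict.getD "perfumes" 0 = 1 from by decide] <;>
    omega

lemma pvAunt_eq (aunt : List (String × Int)) (h : ∀ kv ∈ aunt, kv.1 ∈ pvAllowedKeys) :
    (PySem.Dict.ofList aunt).items.foldl (fun count kv =>
      let key := kv.1
      let value := kv.2
      if key = "cats" ∨ key = "trees" then
        if value ≥ pvRefDict.getD key 0 then count + 1 else count
      else if key = "pomeranians" ∨ key = "goldfish" then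
        if value ≤ pvRefDict.getD key 0 then count + 1 else count
      else if value = pvRefDict.getD key 0 then count + 1 else count) (0 : Int)
    = pvRanges.foldl (fun n r =>
      match (PySem.Dict.ofList aunt).get? r.1 with
      | some v => if pvInRangeB r.2.1 r.2.2 v then n + 1 else n
      | none => n) (0 : Int) := by
  set d := PySem.Dict.ofList aunt with hd
  have hnd : d.keys.Nodup := PySem.Dict.nodup_keys_ofList aunt
  have hsub : ∀ kv ∈ d.items, kv.1 ∈ pvAllowedKeys := by
    intro kv hkv
    have hk := PySem.Dict.mem_keys_of_mem_items _ hkv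
    rw [hd, pvKeys_ofList] at hk
    obtain ⟨⟨k', v'⟩, hm, he⟩ := List.mem_map.mp ((PySem.Set.mem_ofList _ _).mp hk)
    exact he ▸ h _ hm
  rw [pvFoldA_eq, pvFoldB_eq, zero_add, zero_add]
  have hperm := (pvM_perm d hnd hsub).symm
  calc (d.items.map pvAInd).sum
      = (((pvM d).map (fun rv => (rv.1.1, rv.2))).map pvAInd).sum :=
        (hperm.map pvAInd).sum_eq
    _ = ((pvM d).map pvBInd).sum := by
        rw [List.map_map]
        refine congrArg List.sum (List.map_congr_left ?_)
        intro rv hrv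
        obtain ⟨r, hr, v, hget, rfl⟩ := by
          simpa only [pvM, List.mem_filterMap, Option.map_eq_some_iff] using hrv
        exact pvInd_agree r hr v

-- ===== VERDICT (by name: the statement is the Claim_ definition above) =====
theorem comparePartTwo_spec : Claim_equal_comparePartTwo := by
  intro processedData _ hpre
  show comparePartTwo processedData = comparePartTwo_alt processedData
  unfold comparePartTwo comparePartTwo_alt
  rw [PySem.List.foldl_append_singleton_eq_map, PySem.List.foldl_append_singleton_eq_map]
  simp only [List.nil_append]
  exact List.map_congr_left (fun aunt ha => pvAunt_eq aunt (hpre aunt ha))
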